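-- pv_equiv track=rewrite | github.com/Giannasfrisi/Introduction-to-Python | ps3pr2.py | num_multiples
-- ===== SOURCE A (Python) =====
-- def num_multiples(m, values):
--     """ Takes an interger and a value
--     and returns te values that are
--     multiples of the integer"""
--
--     if values == []:
--         return 0
--     else:
--         rest_values = num_multiples(m, values[1:])
--         if values[0] % m == 0:
--             return 1 + rest_values
--         else:
--             return rest_values
-- ===== SOURCE B (Python) =====
-- def num_multiples(m, values):
--     count = 0
--     for v in values:
--         if v % m == 0:
--             count += 1
--     return count
-- ===== Notes on version B (the rewrite author's own statement) =====
-- stated objective: faster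
-- what changed: Replaces the tail recursion that copies values[1:] at every step with a single iterative counting pass.
import Mathlib
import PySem

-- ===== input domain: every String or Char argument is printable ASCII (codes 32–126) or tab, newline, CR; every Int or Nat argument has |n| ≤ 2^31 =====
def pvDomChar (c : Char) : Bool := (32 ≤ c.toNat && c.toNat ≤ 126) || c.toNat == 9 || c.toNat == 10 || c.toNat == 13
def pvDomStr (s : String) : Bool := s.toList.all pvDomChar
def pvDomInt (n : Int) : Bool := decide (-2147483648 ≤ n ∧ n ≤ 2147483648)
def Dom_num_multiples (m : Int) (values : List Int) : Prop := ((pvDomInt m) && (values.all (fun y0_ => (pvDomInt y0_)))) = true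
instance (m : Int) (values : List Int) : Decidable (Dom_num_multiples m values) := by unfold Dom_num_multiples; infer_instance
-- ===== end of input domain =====

-- B replaces A's tail recursion (with its values[1:] copies) by one iterative counting pass; objective: simpler.

-- ===== PORT A =====
def num_multiples (m : Int) (values : List Int) : Int :=
  match values with
  | [] => 0
  | v :: rest =>
    let rest_values := num_multiples m rest   -- values[1:] is the tail
    if PySem.Int.mod v m == 0 then 1 + rest_values else rest_values

-- ===== PORT B =====
def num_multiples_alt (m : Int) (values : List Int) : Int :=
  values.foldl (fun count v => if PySem.Int.mod v m == 0 then count + 1 else count) 0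

-- ===== PRECONDITION & SPEC =====
-- Pre_ excludes m = 0 with a nonempty list: there both A and B raise ZeroDivisionError on the first element.
def Pre_num_multiples (m : Int) (values : List Int) : Prop := m ≠ 0 ∨ values = []
instance (m : Int) (values : List Int) : Decidable (Pre_num_multiples m values) := by unfold Pre_num_multiples; infer_instance
def pvWitness_num_multiples : Int × List Int := (3, [3, 4, 6])
def Spec_num_multiples (m : Int) (values : List Int) (out : Int) : Prop := out = num_multiples_alt m values
instance (m : Int) (values : List Int) (out : Int) : Decidable (Spec_num_multiples m values out) := by unfold Spec_num_multiples; infer_instance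

-- ===== CLAIM (what is proved, stated in full; the proofs are below) =====
def Claim_equal_num_multiples : Prop := ∀ (m : Int) (values : List Int), Dom_num_multiples m values → Pre_num_multiples m values → Spec_num_multiples m values (num_multiples m values)

-- ===== LEMMAS AND PROOFS =====
theorem num_multiples_foldl (m : Int) (values : List Int) :
    ∀ c : Int, values.foldl (fun count v => if PySem.Int.mod v m == 0 then count + 1 else count) c
      = c + num_multiples m values := by
  induction values with
  | nil => intro c; simp [num_multiples]
  | cons v rest ih =>
    intro c
    simp only [List.foldl_cons, num_multiples, ih]
    split <;> omega

-- ===== VERDICT (by name: the statement is the Claim_ definition above) =====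
theorem num_multiples_spec : Claim_equal_num_multiples := by
  intro m values _ _
  unfold Spec_num_multiples num_multiples_alt
  rw [num_multiples_foldl]
  omega
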